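-- pv_equiv track=rewrite | github.com/jsgoller1/algorithms | elements-of-programming-interviews/python/picking_up_coins.py | maximum_revenue_heap
-- ===== SOURCE A (Python) =====
-- from heapq import heapify, heappush, heappop
-- from math import ceil
--
-- def maximum_revenue_heap(coins):
--     # Wrong on ([25, 5, 10, 5, 10, 5, 10, 25, 1, 25, 1, 25, 1, 25, 5, 10])
--     # gives 155, not 140
--     heap = []
--     for coin in coins:
--         heappush(heap, -coin)
--     total = 0
--     half = int(ceil(len(coins)/2))
--     for _ in range(half):
--         total += (-1 * heappop(heap))
--     return total
-- ===== SOURCE B (Python) =====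
-- def maximum_revenue_heap(coins):
--     # sort once (descending) and sum the top ceil(n/2) values
--     return sum(sorted(coins, reverse=True)[:(len(coins) + 1) // 2])
-- ===== Notes on version B (the rewrite author's own statement) =====
-- stated objective: faster
-- what changed: Replaces the heap (n Python-level heappush calls then ceil(n/2) heappop calls) with a single descending sort and a prefix-slice sum.
import Mathlib
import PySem

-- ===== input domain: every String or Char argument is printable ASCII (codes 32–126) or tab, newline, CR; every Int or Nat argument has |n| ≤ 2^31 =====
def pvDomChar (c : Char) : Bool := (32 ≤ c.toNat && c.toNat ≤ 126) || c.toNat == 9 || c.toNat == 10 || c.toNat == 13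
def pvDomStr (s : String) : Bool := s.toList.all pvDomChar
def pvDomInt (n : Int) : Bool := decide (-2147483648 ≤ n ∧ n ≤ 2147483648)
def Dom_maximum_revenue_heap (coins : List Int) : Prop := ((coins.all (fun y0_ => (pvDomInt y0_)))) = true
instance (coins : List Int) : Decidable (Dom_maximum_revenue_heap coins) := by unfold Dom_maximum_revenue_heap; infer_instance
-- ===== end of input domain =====

-- B replaces A's heap (n pushes, then ceil(n/2) pops) by one descending sort and a prefix-slice sum (objective: faster, constant-factor; measured).

-- ===== PORT A =====
-- heapq is not covered by PySem, so CPython's heapq (_siftdown, _siftup, heappush,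
-- heappop) is ported by hand below, step for step; pvG h i is heap[i] (all accesses
-- in heapq are in range, so getD with a junk default is exact).
def pvG (h : List Int) (i : Nat) : Int := h.getD i 0

-- heapq._siftdown(heap, startpos, pos) after 'newitem = heap[pos]' was read
def pvSiftdownAux (h : List Int) (startpos pos : Nat) (newitem : Int) : List Int :=
  if _hp : startpos < pos then
    let parentpos := (pos - 1) / 2
    let parent := pvG h parentpos
    if newitem < parent then
      pvSiftdownAux (h.set pos parent) startpos parentpos newitem
    else h.set pos newitem
  else h.set pos newitem
termination_by pos
decreasing_by omega

-- the hole-moving loop of heapq._siftup (returns final array and final pos)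
def pvSiftupAux (h : List Int) (pos endpos : Nat) : List Int × Nat :=
  let childpos := 2 * pos + 1
  if _hc : childpos < endpos then
    let rightpos := childpos + 1
    let childpos2 := if rightpos < endpos ∧ ¬ (pvG h childpos < pvG h rightpos) then rightpos else childpos
    pvSiftupAux (h.set pos (pvG h childpos2)) childpos2 endpos
  else (h, pos)
termination_by endpos - pos
decreasing_by split_ifs <;> omega

-- heapq._siftup(heap, pos)
def pvSiftup (h : List Int) (pos : Nat) : List Int :=
  let endpos := h.length
  let startpos := pos
  let newitem := pvG h pos
  let r := pvSiftupAux h pos endpos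
  pvSiftdownAux (r.1.set r.2 newitem) startpos r.2 newitem

-- heapq.heappush(heap, item): append then _siftdown(heap, 0, len(heap)-1)
def pvHeappush (h : List Int) (item : Int) : List Int :=
  pvSiftdownAux (h ++ [item]) 0 h.length item

-- heapq.heappop(heap); heap.pop() raises IndexError on [], unreachable in
-- maximum_revenue_heap (half ≤ len(coins)), so the guard value is arbitrary
def pvHeappop (h : List Int) : Int × List Int :=
  if h.isEmpty then (0, [])
  else
    let lastelt := pvG h (h.length - 1)
    let rest := h.dropLast
    if rest.isEmpty then (lastelt, [])
    else (pvG rest 0, pvSiftup (rest.set 0 lastelt) 0)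

-- 'for _ in range(half): total += (-1 * heappop(heap))'
def pvPopLoop : Nat → List Int → Int → Int
  | 0, _, total => total
  | k+1, h, total =>
    let p := pvHeappop h
    pvPopLoop k p.2 (total + (-1) * p.1)

def maximum_revenue_heap (coins : List Int) : Int :=
  let heap := coins.foldl (fun h coin => pvHeappush h (-coin)) []
  -- int(ceil(len(coins)/2)): n/2 is an exact binary float for list lengths, so this is (n+1)/2
  let half := (coins.length + 1) / 2
  pvPopLoop half heap 0

-- ===== PORT B =====
def maximum_revenue_heap_alt (coins : List Int) : Int :=
  (PySem.List.slice (PySem.List.sorted coins (fun x => x) true) none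
    (some (PySem.Int.floordiv ((coins.length : Int) + 1) 2))).sum

-- ===== PRECONDITION & SPEC =====
def Spec_maximum_revenue_heap (coins : List Int) (out : Int) : Prop := out = maximum_revenue_heap_alt coins
instance (coins : List Int) (out : Int) : Decidable (Spec_maximum_revenue_heap coins out) := by unfold Spec_maximum_revenue_heap; infer_instance

-- ===== CLAIM (what is proved, stated in full; the proofs are below) =====
def Claim_equal_maximum_revenue_heap : Prop := ∀ (coins : List Int), Dom_maximum_revenue_heap coins → Spec_maximum_revenue_heap coins (maximum_revenue_heap coins)

-- ===== LEMMAS AND PROOFS =====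

-- heap[i] after heap[j] := v
theorem pvG_set_self (h : List Int) (i : Nat) (a : Int) (hi : i < h.length) :
    pvG (h.set i a) i = a := by
  simp [pvG, List.getD_eq_getElem?_getD, hi]

theorem pvG_set_ne (h : List Int) (i j : Nat) (a : Int) (hij : i ≠ j) :
    pvG (h.set i a) j = pvG h j := by
  simp [pvG, List.getD_eq_getElem?_getD, List.getElem?_set_ne hij]

-- swapping two cells is a permutation
theorem pv_perm_cons_set (t : List Int) (m : Nat) (x : Int) (hm : m < t.length) :
    (pvG t m :: t.set m x).Perm (x :: t) := by
  induction t generalizing m with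
  | nil => simp at hm
  | cons b t' ih =>
    cases m with
    | zero => simpa [pvG] using List.Perm.swap x b t'
    | succ m' =>
      have hm' : m' < t'.length := by simpa using hm
      have h1 : (pvG (b :: t') (m' + 1) :: (b :: t').set (m' + 1) x)
          = pvG t' m' :: b :: t'.set m' x := by simp [pvG]
      rw [h1]
      exact ((List.Perm.swap _ _ _).trans ((ih m' hm').cons b)).trans (List.Perm.swap _ _ _)

theorem pv_perm_set_swap2 (t : List Int) (m : Nat) (a x : Int) (hm : m < t.length) :
    (x :: t.set m a).Perm (a :: t.set m x) := by
  induction t generalizing m with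
  | nil => simp at hm
  | cons b t' ih =>
    cases m with
    | zero => simpa using List.Perm.swap a x t'
    | succ m' =>
      have hm' : m' < t'.length := by simpa using hm
      have h1 : (x :: (b :: t').set (m' + 1) a) = x :: b :: t'.set m' a := by simp
      have h2 : a :: (b :: t').set (m' + 1) x = a :: b :: t'.set m' x := by simp
      rw [h1, h2]
      exact ((List.Perm.swap _ _ _).trans ((ih m' hm').cons b)).trans (List.Perm.swap _ _ _)

theorem pv_set_set_perm (h : List Int) (i j : Nat) (x : Int)
    (hi : i < h.length) (hj : j < h.length) (hij : i ≠ j) :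
    ((h.set i (pvG h j)).set j x).Perm (h.set i x) := by
  induction h generalizing i j with
  | nil => simp at hi
  | cons a t ih =>
    cases i with
    | zero =>
      cases j with
      | zero => exact absurd rfl hij
      | succ m =>
        have hm : m < t.length := by simpa using hj
        have h1 : (((a :: t).set 0 (pvG (a :: t) (m + 1))).set (m + 1) x)
            = pvG t m :: t.set m x := by simp [pvG]
        have h2 : (a :: t).set 0 x = x :: t := by simp
        rw [h1, h2]
        exact pv_perm_cons_set t m x hm
    | succ m =>
      cases j with
      | zero =>
        have hm : m < t.length := by simpa using hi
        have h1 : (((a :: t).set (m + 1) (pvG (a :: t) 0)).set 0 x)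
            = x :: t.set m a := by simp [pvG]
        have h2 : (a :: t).set (m + 1) x = a :: t.set m x := by simp
        rw [h1, h2]
        exact pv_perm_set_swap2 t m a x hm
      | succ m' =>
        have hi' : m < t.length := by simpa using hi
        have hj' : m' < t.length := by simpa using hj
        have hij' : m ≠ m' := by omega
        have h1 : (((a :: t).set (m + 1) (pvG (a :: t) (m' + 1))).set (m' + 1) x)
            = a :: ((t.set m (pvG t m')).set m' x) := by simp [pvG]
        have h2 : (a :: t).set (m + 1) x = a :: t.set m x := by simp
        rw [h1, h2]
        exact (ih m m' hi' hj' hij').cons a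

theorem pvSiftdownAux_perm (h : List Int) (s pos : Nat) (x : Int) (hpos : pos < h.length) :
    (pvSiftdownAux h s pos x).Perm (h.set pos x) := by
  fun_induction pvSiftdownAux h s pos x with
  | case1 h pos hslt pp parent hlt ih =>
    have hpp : pp < h.length := by simp only [pp]; omega
    have hpp2 : pp < (h.set pos parent).length := by simpa using hpp
    have hne : pos ≠ pp := by simp only [pp]; omega
    exact (ih hpp2).trans (pv_set_set_perm h pos pp x hpos hpp hne)
  | case2 h pos hslt pp parent hlt => exact List.Perm.refl _
  | case3 h pos hslt => exact List.Perm.refl _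

-- heap invariant, and the "hole at p holding x" invariants
def PHInv (h : List Int) : Prop :=
  ∀ i, 0 < i → i < h.length → pvG h ((i - 1) / 2) ≤ pvG h i

def PAH (h : List Int) (p : Nat) (x : Int) : Prop :=
  (∀ i, 0 < i → i < h.length → i ≠ p →
      pvG (h.set p x) ((i - 1) / 2) ≤ pvG (h.set p x) i) ∧
  (0 < p → ∀ j, j < h.length → (j - 1) / 2 = p →
      pvG (h.set p x) ((p - 1) / 2) ≤ pvG (h.set p x) j)

def PInv2 (h : List Int) (p : Nat) : Prop :=
  (∀ i, 0 < i → i < h.length → i ≠ p → (i - 1) / 2 ≠ p →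
      pvG h ((i - 1) / 2) ≤ pvG h i) ∧
  (0 < p → ∀ j, j < h.length → (j - 1) / 2 = p →
      pvG h ((p - 1) / 2) ≤ pvG h j)

theorem pvSiftdownAux_inv (h : List Int) (pos : Nat) (x : Int)
    (hpos : pos < h.length) (hah : PAH h pos x) :
    PHInv (pvSiftdownAux h 0 pos x) := by
  fun_induction pvSiftdownAux h 0 pos x with
  | case1 h pos hslt pp parent hlt ih =>
    have hpp0 : pp = (pos - 1) / 2 := rfl
    have hpar0 : parent = pvG h pp := rfl
    have hpplt : pp < pos := by omega
    have hpplen : pp < h.length := by omega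
    have hnep : pos ≠ pp := by omega
    -- values in the old virtual array h.set pos x
    have f : ∀ i, i ≠ pos → pvG (h.set pos x) i = pvG h i :=
      fun i hi => pvG_set_ne h pos i x (fun e => hi e.symm)
    apply ih (by simpa using hpplen)
    constructor
    · intro i hi0 hilen hipp
      have hilen' : i < h.length := by simpa using hilen
      have epp : pvG ((h.set pos parent).set pp x) pp = x := by
        rw [pvG_set_self _ pp x (by simpa using hpplen)]
      have eo : ∀ k, k ≠ pos → k ≠ pp → pvG ((h.set pos parent).set pp x) k = pvG h k := by
        intro k h1 h2
        rw [pvG_set_ne _ pp k x (fun e => h2 e.symm), pvG_set_ne h pos k parent (fun e => h1 e.symm)]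
      have epos : pvG ((h.set pos parent).set pp x) pos = pvG h pp := by
        rw [pvG_set_ne _ pp pos x hnep.symm, pvG_set_self h pos parent hpos]
      by_cases hipos : i = pos
      · subst hipos
        have : (i - 1) / 2 = pp := hpp0.symm
        rw [this, epp, epos]
        exact le_of_lt hlt
      · by_cases hpar : (i - 1) / 2 = pos
        · have hibig : 2 * pos + 1 ≤ i := by omega
          have hippne : i ≠ pp := by omega
          rw [hpar, epos, eo i hipos hippne]
          have h2 := hah.2 (by omega) i hilen' hpar
          rw [f i hipos] at h2
          have : pvG (h.set pos x) ((pos - 1) / 2) = pvG h pp := by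
            rw [← hpp0]; exact f pp hnep.symm
          rw [this] at h2
          exact h2
        · by_cases hparpp : (i - 1) / 2 = pp
          · rw [hparpp, epp, eo i hipos (by omega)]
            have h1 := hah.1 i hi0 hilen' hipos
            rw [f i hipos, hparpp] at h1
            rw [f pp hnep.symm] at h1
            exact le_of_lt (lt_of_lt_of_le hlt h1)
          · rw [eo i hipos (by omega), eo ((i-1)/2) hpar hparpp]
            have h1 := hah.1 i hi0 hilen' hipos
            rw [f i hipos, f _ hpar] at h1
            exact h1
    · intro hpp0' j hjlen hjpar
      have hjlen' : j < h.length := by simpa using hjlen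
      have hjbig : 2 * pp + 1 ≤ j := by omega
      have hgp : (pp - 1) / 2 ≠ pos := by omega
      have hgppp : (pp - 1) / 2 ≠ pp := by omega
      have eo : ∀ k, k ≠ pos → k ≠ pp → pvG ((h.set pos parent).set pp x) k = pvG h k := by
        intro k h1 h2
        rw [pvG_set_ne _ pp k x (fun e => h2 e.symm), pvG_set_ne h pos k parent (fun e => h1 e.symm)]
      have epos : pvG ((h.set pos parent).set pp x) pos = pvG h pp := by
        rw [pvG_set_ne _ pp pos x hnep.symm, pvG_set_self h pos parent hpos]
      have key : pvG h ((pp - 1) / 2) ≤ pvG h pp := by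
        have h1 := hah.1 pp hpp0' hpplen hnep.symm
        rw [f pp hnep.symm, f _ hgp] at h1
        rw [hpp0] at h1
        exact h1
      rw [eo ((pp-1)/2) hgp hgppp]
      by_cases hjpos : j = pos
      · subst hjpos; rw [epos]; exact key
      · rw [eo j hjpos (by omega)]
        have h1 := hah.1 j (by omega) hjlen' hjpos
        rw [f j hjpos, hjpar, f pp hnep.symm] at h1
        exact le_trans key h1
  | case2 h pos hslt pp parent hlt =>
    intro i hi0 hilen
    have hilen' : i < h.length := by simpa using hilen
    have hpplen : pp < h.length := by omega
    have hnep : pos ≠ pp := by omega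
    by_cases hipos : i = pos
    · subst hipos
      have e1 : (i - 1) / 2 = pp := rfl
      rw [e1, pvG_set_ne h i pp x hnep, pvG_set_self h i x hpos]
      exact not_lt.mp hlt
    · exact hah.1 i hi0 hilen' hipos
  | case3 h pos hslt =>
    intro i hi0 hilen
    have hilen' : i < h.length := by simpa using hilen
    have hipos : i ≠ pos := by omega
    exact hah.1 i hi0 hilen' hipos

theorem pvSiftupAux_spec (h : List Int) (pos endpos : Nat) :
    endpos = h.length → pos < h.length → PInv2 h pos →
    (pvSiftupAux h pos endpos).1.length = h.length ∧
    (pvSiftupAux h pos endpos).2 < h.length ∧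
    ¬ (2 * (pvSiftupAux h pos endpos).2 + 1 < h.length) ∧
    PInv2 (pvSiftupAux h pos endpos).1 (pvSiftupAux h pos endpos).2 ∧
    (∀ x, ((pvSiftupAux h pos endpos).1.set (pvSiftupAux h pos endpos).2 x).Perm (h.set pos x)) := by
  fun_induction pvSiftupAux h pos endpos with
  | case1 h pos cp hc rp c2 ih =>
    intro hend hpos hinv
    have hcp : cp = 2 * pos + 1 := rfl
    have hrp : rp = cp + 1 := rfl
    have hc2cases : c2 = rp ∨ c2 = cp := by
      simp only [c2]; split_ifs <;> simp
    have hc2lt : c2 < endpos := by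
      rcases hc2cases with h1 | h1 <;> simp only [c2] at * <;> split_ifs at * <;> omega
    have hc2len : c2 < h.length := hend ▸ hc2lt
    have hposc2 : pos ≠ c2 := by omega
    have eo : ∀ k, k ≠ pos → pvG (h.set pos (pvG h c2)) k = pvG h k :=
      fun k hk => pvG_set_ne h pos k _ (fun e => hk e.symm)
    have epos : pvG (h.set pos (pvG h c2)) pos = pvG h c2 :=
      pvG_set_self h pos _ hpos
    have hparc2 : (c2 - 1) / 2 = pos := by rcases hc2cases with h1 | h1 <;> omega
    have hminc2 : ∀ i, (i - 1) / 2 = pos → i ≠ pos → i < h.length → pvG h c2 ≤ pvG h i := by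
      intro i hpari hine hilen
      by_cases hieq : i = c2
      · subst hieq; exact le_refl _
      · have hicases : i = 2 * pos + 1 ∨ i = 2 * pos + 2 := by omega
        by_cases hcond : rp < endpos ∧ ¬ (pvG h cp < pvG h rp)
        · have hc2v : c2 = rp := by simp only [c2]; rw [dif_pos hcond]
          have hiv : i = cp := by omega
          rw [hc2v, hiv]
          exact not_lt.mp hcond.2
        · have hc2v : c2 = cp := by simp only [c2]; rw [dif_neg hcond]
          have hiv : i = rp := by omega
          have hr : rp < endpos := by omega
          have : pvG h cp < pvG h rp := by
            by_contra hcc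
            exact hcond ⟨hr, hcc⟩
          rw [hc2v, hiv]
          exact le_of_lt this
    have hinv2 : PInv2 (h.set pos (pvG h c2)) c2 := by
      constructor
      · intro i hi0 hilen hic2 hparic2
        have hilen' : i < h.length := by simpa using hilen
        by_cases hipos : i = pos
        · have hpos0 : 0 < pos := by omega
          have hppne : (pos - 1) / 2 ≠ pos := by omega
          rw [hipos, epos, eo _ hppne]
          exact hinv.2 hpos0 c2 hc2len hparc2
        · by_cases hpari : (i - 1) / 2 = pos
          · rw [hpari, epos, eo i hipos]
            exact hminc2 i hpari hipos hilen'
          · rw [eo i hipos, eo _ hpari]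
            exact hinv.1 i hi0 hilen' hipos hpari
      · intro hc20 j hjlen hparj
        have hjlen' : j < h.length := by simpa using hjlen
        have hjpos : j ≠ pos := by omega
        have hjc2 : j ≠ c2 := by omega
        rw [hparc2, epos, eo j hjpos]
        have h1 := hinv.1 j (by omega) hjlen' hjpos (by omega)
        rw [hparj] at h1
        exact h1
    have hlen2 : (h.set pos (pvG h c2)).length = h.length := by simp
    have hend2 : endpos = (h.set pos (pvG h c2)).length := by rw [hlen2]; exact hend
    obtain ⟨l1, l2, l3, l4, l5⟩ := ih hend2 (by omega) hinv2
    refine ⟨by omega, by omega, by rw [hlen2] at l3; exact l3, l4, ?_⟩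
    intro x
    exact (l5 x).trans (pv_set_set_perm h pos c2 x hpos hc2len hposc2)
  | case2 h pos cp hc =>
    intro hend hpos hinv
    exact ⟨rfl, hpos, by omega, hinv, fun x => List.Perm.refl _⟩

theorem pvG_append (h t : List Int) (i : Nat) (hi : i < h.length) :
    pvG (h ++ t) i = pvG h i := by
  simp [pvG, List.getD_eq_getElem?_getD, List.getElem?_append_left hi]

theorem pv_set_zero_root (h : List Int) (hne : h ≠ []) : h.set 0 (pvG h 0) = h := by
  cases h with
  | nil => simp
  | cons a t => simp [pvG]

theorem pvSiftup_spec (h : List Int) (hne : h ≠ []) (hinv : PInv2 h 0) :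
    PHInv (pvSiftup h 0) ∧ (pvSiftup h 0).Perm h := by
  have hlen0 : 0 < h.length := List.length_pos_iff.mpr hne
  obtain ⟨l1, l2, l3, l4, l5⟩ := pvSiftupAux_spec h 0 h.length rfl hlen0 hinv
  set r := pvSiftupAux h 0 h.length with hr
  set w := pvG h 0 with hw
  have hres : pvSiftup h 0 = pvSiftdownAux (r.1.set r.2 w) 0 r.2 w := rfl
  have hlen1 : (r.1.set r.2 w).length = h.length := by simpa using l1
  have hr2lt : r.2 < (r.1.set r.2 w).length := by omega
  have hset2 : (r.1.set r.2 w).set r.2 w = r.1.set r.2 w := List.set_set ..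
  have hah : PAH (r.1.set r.2 w) r.2 w := by
    constructor
    · intro i hi0 hilen hir2
      rw [hset2]
      have hilen' : i < h.length := by omega
      have hpar : (i - 1) / 2 ≠ r.2 := by
        intro e
        have : 2 * r.2 + 1 ≤ i := by omega
        omega
      have e1 : pvG (r.1.set r.2 w) i = pvG r.1 i := pvG_set_ne r.1 r.2 i w (fun e => hir2 e.symm)
      have e2 : pvG (r.1.set r.2 w) ((i - 1) / 2) = pvG r.1 ((i - 1) / 2) :=
        pvG_set_ne r.1 r.2 _ w (fun e => hpar e.symm)
      rw [e1, e2]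
      exact l4.1 i hi0 (by omega) hir2 hpar
    · intro hr20 j hjlen hjpar
      exfalso
      have : 2 * r.2 + 1 ≤ j := by omega
      omega
  constructor
  · rw [hres]
    exact pvSiftdownAux_inv (r.1.set r.2 w) r.2 w hr2lt hah
  · rw [hres]
    have p1 := pvSiftdownAux_perm (r.1.set r.2 w) 0 r.2 w hr2lt
    rw [hset2] at p1
    have p2 := l5 w
    have p3 : h.set 0 w = h := pv_set_zero_root h hne
    rw [p3] at p2
    exact p1.trans p2

theorem pvHeappush_spec (h : List Int) (x : Int) (hinv : PHInv h) :
    PHInv (pvHeappush h x) ∧ (pvHeappush h x).Perm (x :: h) := by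
  have hlen : h.length < (h ++ [x]).length := by simp
  have hset : (h ++ [x]).set h.length x = h ++ [x] := by
    rw [List.set_append_right _ _ (le_refl h.length)]
    simp
  have hah : PAH (h ++ [x]) h.length x := by
    constructor
    · intro i hi0 hilen hine
      rw [hset]
      have hilt : i < h.length := by simp at hilen; omega
      have hplt : (i - 1) / 2 < h.length := by omega
      rw [pvG_append h [x] i hilt, pvG_append h [x] _ hplt]
      exact hinv i hi0 hilt
    · intro h0 j hjlen hjpar
      exfalso
      have : 2 * h.length + 1 ≤ j := by omega
      simp at hjlen
      omega
  constructor
  · exact pvSiftdownAux_inv (h ++ [x]) h.length x hlen hah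
  · have p1 := pvSiftdownAux_perm (h ++ [x]) 0 h.length x hlen
    rw [hset] at p1
    exact p1.trans (List.perm_append_singleton x h)

theorem pv_root_min (h : List Int) (hinv : PHInv h) :
    ∀ i, i < h.length → pvG h 0 ≤ pvG h i := by
  intro i
  induction i using Nat.strong_induction_on with
  | _ i ih =>
    intro hi
    cases Nat.eq_zero_or_pos i with
    | inl h0 => subst h0; exact le_refl _
    | inr h0 =>
      have h1 : (i - 1) / 2 < i := by omega
      exact le_trans (ih _ h1 (lt_trans h1 hi)) (hinv i h0 hi)

theorem pv_root_min_mem (h : List Int) (hinv : PHInv h) :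
    ∀ y ∈ h, pvG h 0 ≤ y := by
  intro y hy
  obtain ⟨i, hi, rfl⟩ := List.mem_iff_getElem.mp hy
  have : pvG h i = h[i] := by simp [pvG, List.getD_eq_getElem?_getD, List.getElem?_eq_getElem hi]
  rw [← this]
  exact pv_root_min h hinv i hi

theorem pvHeappop_spec (h : List Int) (hne : h ≠ []) (hinv : PHInv h) :
    (pvHeappop h).1 = pvG h 0 ∧ ((pvHeappop h).1 :: (pvHeappop h).2).Perm h ∧
    PHInv (pvHeappop h).2 := by
  have hE : h.isEmpty = false := by simpa [List.isEmpty_iff] using hne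
  have hdec : h = h.dropLast ++ [h.getLast hne] := (List.dropLast_append_getLast hne).symm
  have hlast : pvG h (h.length - 1) = h.getLast hne := by
    have h1 : h.length - 1 < h.length := by
      have := List.length_pos_iff.mpr hne; omega
    rw [List.getLast_eq_getElem]
    simp [pvG, List.getD_eq_getElem?_getD, List.getElem?_eq_getElem h1]
  by_cases hrest : h.dropLast.isEmpty
  · -- h is a singleton
    obtain ⟨a, t, rfl⟩ : ∃ a t, h = a :: t := by
      cases h with
      | nil => exact absurd rfl hne
      | cons a t => exact ⟨a, t, rfl⟩
    have ht : t = [] := by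
      have h2 := List.isEmpty_iff.mp hrest
      cases t with
      | nil => rfl
      | cons b u => simp at h2
    subst ht
    refine ⟨?_, ?_, ?_⟩
    · simp [pvHeappop, pvG]
    · simp [pvHeappop, pvG]
    · simp [pvHeappop]
      intro i hi0 hilen
      simp at hilen
  · have hrest' : h.dropLast.isEmpty = false := by simpa using hrest
    have hdne : h.dropLast ≠ [] := fun e => by simp [e] at hrest
    have hdlen : 0 < h.dropLast.length := List.length_pos_iff.mpr hdne
    have hres : pvHeappop h =
        (pvG h.dropLast 0, pvSiftup (h.dropLast.set 0 (pvG h (h.length - 1))) 0) := by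
      simp [pvHeappop, hE, hrest']
    set L := pvG h (h.length - 1) with hL
    set rest := h.dropLast with hrestdef
    have hr0 : pvG rest 0 = pvG h 0 := by
      conv_rhs => rw [hdec]
      rw [pvG_append _ _ 0 hdlen]
    have hinv2 : PInv2 (rest.set 0 L) 0 := by
      constructor
      · intro i hi0 hilen hi00 hpar0
        have hilen' : i < rest.length := by simpa using hilen
        rw [pvG_set_ne rest 0 i L (fun e => hi00 e.symm),
            pvG_set_ne rest 0 _ L (fun e => hpar0 e.symm)]
        have hih : i < h.length := by
          rw [hrestdef] at hilen'; simp at hilen'; omega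
        have hparh : (i - 1) / 2 < rest.length := by omega
        have e1 : pvG rest i = pvG h i := by
          conv_rhs => rw [hdec]; rw [pvG_append _ _ i hilen']
        have e2 : pvG rest ((i - 1) / 2) = pvG h ((i - 1) / 2) := by
          conv_rhs => rw [hdec]; rw [pvG_append _ _ _ hparh]
        rw [e1, e2]
        exact hinv i hi0 hih
      · intro h00; exact absurd h00 (lt_irrefl 0)
    have hsne : rest.set 0 L ≠ [] := by
      intro e
      have h2 := congrArg List.length e
      simp at h2
      exact hdne h2
    obtain ⟨s1, s2⟩ := pvSiftup_spec (rest.set 0 L) hsne hinv2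
    refine ⟨by rw [hres, hr0], ?_, by rw [hres]; exact s1⟩
    rw [hres]
    have p1 : (pvG rest 0 :: pvSiftup (rest.set 0 L) 0).Perm (pvG rest 0 :: rest.set 0 L) :=
      s2.cons _
    have hperm2 : (rest ++ [h.getLast hne]).Perm h := by rw [← hdec]
    refine (p1.trans ?_).trans hperm2
    -- (pvG rest 0 :: rest.set 0 L) ~ rest ++ [L]
    rw [hlast]
    obtain ⟨r0, t, hrt⟩ := List.exists_cons_of_ne_nil hdne
    rw [hrt]
    have e3 : pvG (r0 :: t) 0 = r0 := by simp [pvG]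
    rw [e3]
    simp only [List.set_cons_zero, List.cons_append]
    exact (List.perm_append_singleton _ _).symm.cons r0

theorem pvPopLoop_eq (k : Nat) : ∀ (h : List Int) (total : Int), PHInv h → k ≤ h.length →
    pvPopLoop k h total =
      total - ((PySem.List.sorted h (fun x => x) false).take k).sum := by
  induction k with
  | zero => intro h total _ _; simp [pvPopLoop]
  | succ k ih =>
    intro h total hinv hk
    have hne : h ≠ [] := by
      intro e; subst e; simp at hk
    obtain ⟨e1, e2, e3⟩ := pvHeappop_spec h hne hinv
    have hlen : (pvHeappop h).2.length + 1 = h.length := by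
      have := e2.length_eq
      simpa using this
    have hsorted : PySem.List.sorted h (fun x => x) false =
        (pvHeappop h).1 :: PySem.List.sorted (pvHeappop h).2 (fun x => x) false := by
      apply PySem.List.eq_of_perm_of_pairwise_le_of_injective (key := fun x : Int => x)
        (fun a b e => e)
      · exact ((PySem.List.sorted_perm h _ _).trans e2.symm).trans
          ((PySem.List.sorted_perm (pvHeappop h).2 _ _).symm.cons _)
      · exact PySem.List.sorted_pairwise h (fun x => x)
      · refine List.pairwise_cons.mpr ⟨?_, PySem.List.sorted_pairwise _ (fun x => x)⟩
        intro y hy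
        have hy2 : y ∈ (pvHeappop h).2 := (PySem.List.mem_sorted _ _ _ _).mp hy
        have hyh : y ∈ h := e2.subset (List.mem_cons_of_mem _ hy2)
        rw [e1]
        exact pv_root_min_mem h hinv y hyh
    have step : pvPopLoop (k + 1) h total =
        pvPopLoop k (pvHeappop h).2 (total + (-1) * (pvHeappop h).1) := rfl
    rw [step, ih (pvHeappop h).2 _ e3 (by omega), hsorted]
    simp only [List.take_succ_cons, List.sum_cons]
    ring

theorem pv_build_spec (l : List Int) : ∀ acc : List Int, PHInv acc →
    PHInv (l.foldl (fun h coin => pvHeappush h (-coin)) acc) ∧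
    (l.foldl (fun h coin => pvHeappush h (-coin)) acc).Perm (l.map (fun c => -c) ++ acc) := by
  induction l with
  | nil => intro acc hinv; exact ⟨hinv, by simp⟩
  | cons c l ih =>
    intro acc hinv
    obtain ⟨p1, p2⟩ := pvHeappush_spec acc (-c) hinv
    obtain ⟨q1, q2⟩ := ih (pvHeappush acc (-c)) p1
    refine ⟨q1, ?_⟩
    simp only [List.foldl_cons] at *
    refine q2.trans ?_
    refine ((p2.append_left (l.map (fun c => -c))).trans ?_)
    simp only [List.map_cons, List.cons_append]
    exact (List.perm_middle).trans (List.Perm.refl _)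

theorem pv_sum_map_neg (l : List Int) : (l.map (fun x => -x)).sum = -l.sum := by
  induction l with
  | nil => simp
  | cons a t ih => simp [ih]; ring

-- ===== VERDICT (by name: the statement is the Claim_ definition above) =====
theorem pv_desc_neg (coins : List Int) :
    PySem.List.sorted (coins.map (fun c => -c)) (fun x => x) false =
      (PySem.List.sorted coins (fun x => x) true).map (fun x => -x) := by
  apply PySem.List.eq_of_perm_of_pairwise_le_of_injective (key := fun x : Int => x)
    (fun a b e => e)
  · exact (PySem.List.sorted_perm _ _ _).trans
      ((PySem.List.sorted_perm coins (fun x => x) true).map _).symm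
  · exact PySem.List.sorted_pairwise _ (fun x => x)
  · refine List.pairwise_map.mpr ?_
    exact (PySem.List.sorted_pairwise_rev coins (fun x => x)).imp (fun hab => by omega)

theorem maximum_revenue_heap_spec : Claim_equal_maximum_revenue_heap := by
  intro coins _
  unfold Spec_maximum_revenue_heap
  unfold maximum_revenue_heap maximum_revenue_heap_alt
  have hhalf : PySem.Int.floordiv ((coins.length : Int) + 1) 2
      = (((coins.length + 1) / 2 : Nat) : Int) := by
    have h1 : ((coins.length : Int) + 1) = ((coins.length + 1 : Nat) : Int) := by push_cast; ring
    rw [h1]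
    exact_mod_cast PySem.Int.floordiv_natCast (coins.length + 1) 2
  rw [hhalf, PySem.List.slice_to_natCast]
  obtain ⟨b1, b2⟩ := pv_build_spec coins [] (by intro i hi0 hilen; simp at hilen)
  rw [List.append_nil] at b2
  set heap := coins.foldl (fun h coin => pvHeappush h (-coin)) [] with hheap
  have hlen : heap.length = coins.length := by
    rw [b2.length_eq, List.length_map]
  have hhle : (coins.length + 1) / 2 ≤ heap.length := by omega
  rw [pvPopLoop_eq _ heap 0 b1 hhle]
  have hs : PySem.List.sorted heap (fun x => x) false
      = PySem.List.sorted (coins.map (fun c => -c)) (fun x => x) false :=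
    PySem.List.sorted_eq_sorted_of_perm _ _ _ (fun a b e => e) b2
  rw [hs, pv_desc_neg, ← List.map_take, pv_sum_map_neg]
  ring
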